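-- pv_equiv track=rewrite | github.com/PaulineTurk/Stage_MNHN | utils_dev/brierPredictor.py | predictorIdentity
-- ===== SOURCE A (Python) =====
-- def predictorIdentity(list_residu):
--     predictor_name = "Identity Predictor"
--     cond_proba_id = {}
--     for elem_l in list_residu:
--         cond_proba_id[elem_l] = {}
--         for elem_c in list_residu:
--             if elem_l == elem_c:
--                 cond_proba_id[elem_l][elem_c] = 1
--             else:
--                 cond_proba_id[elem_l][elem_c] = 0
--
--     unit_brier_id = unitBrier(cond_proba_id, list_residu)
--     return predictor_name, cond_proba_id, unit_brier_id
--
-- def unitBrier(cond_proba, list_residu):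
--     unit_Brier = {}
--     for aa_1 in list_residu:
--         unit_Brier[aa_1] = {}
--         for aa_2 in list_residu:
--             unit = 0
--             for j in list_residu:
--                 unit += (cond_proba[aa_1][j] - int(aa_2 == j))**2
--             unit_Brier[aa_1][aa_2] = unit
--     return unit_Brier
-- ===== SOURCE B (Python) =====
-- def predictorIdentity(list_residu):
--     counts = {}
--     for r in list_residu:
--         counts[r] = counts.get(r, 0) + 1
--     keys = list(counts)
--     cond_proba_id = {a: {b: int(a == b) for b in keys} for a in keys}
--     unit_brier_id = {a: {b: 0 if a == b else counts[a] + counts[b] for b in keys}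
--                      for a in keys}
--     return "Identity Predictor", cond_proba_id, unit_brier_id
-- ===== Notes on version B (the rewrite author's own statement) =====
-- stated objective: faster
-- what changed: Replaces the O(n^3) triple loop (per-cell Brier sum over the whole list) by a closed form over the deduplicated keys with a precomputed count dict: diagonal 0, off-diagonal count(a)+count(b).
import Mathlib
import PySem

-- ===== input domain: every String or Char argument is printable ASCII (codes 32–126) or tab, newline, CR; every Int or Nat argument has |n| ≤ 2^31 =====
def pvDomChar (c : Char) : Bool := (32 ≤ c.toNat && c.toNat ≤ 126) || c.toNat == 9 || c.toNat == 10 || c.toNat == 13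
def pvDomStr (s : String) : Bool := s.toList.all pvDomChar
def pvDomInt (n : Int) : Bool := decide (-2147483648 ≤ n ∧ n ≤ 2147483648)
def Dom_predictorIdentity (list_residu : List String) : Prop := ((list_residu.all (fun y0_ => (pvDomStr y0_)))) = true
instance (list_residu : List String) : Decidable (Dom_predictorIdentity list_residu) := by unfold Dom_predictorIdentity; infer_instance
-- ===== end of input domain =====

-- B replaces A's O(n^3) per-cell Brier summation loop by a closed form over the
-- deduplicated residues with a precomputed count dict (diagonal 0, off-diagonal
-- count(a)+count(b)); equivalence of the returned value is proved below.

-- ===== PORT A =====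
-- helper unitBrier: Python's triple loop. cond_proba[aa_1][j] is rendered with
-- getD (default empty / 0); exact here because every call site has aa_1 and j
-- among the keys of cond_proba and its rows.
def unitBrier (cond_proba : PySem.Dict String (PySem.Dict String Int)) (list_residu : List String) : PySem.Dict String (PySem.Dict String Int) :=
  list_residu.foldl (fun unit_Brier aa_1 =>
    list_residu.foldl (fun unit_Brier aa_2 =>
      let unit : Int := list_residu.foldl (fun unit j =>
        unit + ((cond_proba.getD aa_1 PySem.Dict.empty).getD j 0 - (if aa_2 == j then 1 else 0)) ^ 2) 0
      unit_Brier.modify aa_1 PySem.Dict.empty (fun inner => inner.insert aa_2 unit))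
      (unit_Brier.insert aa_1 PySem.Dict.empty))
    PySem.Dict.empty

def predictorIdentity (list_residu : List String) : String × (List (String × List (String × Int))) × (List (String × List (String × Int))) :=
  let predictor_name := "Identity Predictor"
  let cond_proba_id : PySem.Dict String (PySem.Dict String Int) :=
    list_residu.foldl (fun cond_proba_id elem_l =>
      list_residu.foldl (fun cond_proba_id elem_c =>
        cond_proba_id.modify elem_l PySem.Dict.empty (fun inner =>
          inner.insert elem_c (if elem_l == elem_c then (1 : Int) else 0)))
        (cond_proba_id.insert elem_l PySem.Dict.empty))
      PySem.Dict.empty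
  let unit_brier_id := unitBrier cond_proba_id list_residu
  (predictor_name,
   cond_proba_id.items.map (fun p => (p.1, p.2.items)),
   unit_brier_id.items.map (fun p => (p.1, p.2.items)))

-- ===== PORT B =====
def predictorIdentity_alt (list_residu : List String) : String × (List (String × List (String × Int))) × (List (String × List (String × Int))) :=
  let counts : PySem.Dict String Int :=
    list_residu.foldl (fun counts r => counts.insert r (counts.getD r 0 + 1)) PySem.Dict.empty
  let keys := counts.keys
  let cond_proba_id := keys.map (fun a => (a, keys.map (fun b => (b, if a == b then (1 : Int) else 0))))
  let unit_brier_id := keys.map (fun a => (a, keys.map (fun b =>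
    (b, if a == b then (0 : Int) else counts.getD a 0 + counts.getD b 0))))
  ("Identity Predictor", cond_proba_id, unit_brier_id)

-- ===== PRECONDITION & SPEC =====
def Spec_predictorIdentity (list_residu : List String) (out : String × (List (String × List (String × Int))) × (List (String × List (String × Int)))) : Prop := out = predictorIdentity_alt list_residu
instance (list_residu : List String) (out : String × (List (String × List (String × Int))) × (List (String × List (String × Int)))) : Decidable (Spec_predictorIdentity list_residu out) := by unfold Spec_predictorIdentity; infer_instance

-- ===== CLAIM (what is proved, stated in full; the proofs are below) =====
def Claim_equal_predictorIdentity : Prop := ∀ (list_residu : List String), Dom_predictorIdentity list_residu → Spec_predictorIdentity list_residu (predictorIdentity list_residu)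

-- ===== LEMMAS AND PROOFS =====

-- a dict whose entries are a function of its (listed) keys
def pvKeyed {ν : Type} (P : List String) (F : String → ν) : PySem.Dict String ν :=
  PySem.Dict.mk (P.map (fun a => (a, F a)))

theorem pvKeyed_congr {ν : Type} (P : List String) (F G : String → ν)
    (h : ∀ a ∈ P, F a = G a) : pvKeyed P F = pvKeyed P G := by
  unfold pvKeyed
  exact congrArg PySem.Dict.mk (List.map_congr_left (fun a ha => by rw [h a ha]))

theorem pvKeyed_contains {ν : Type} (P : List String) (F : String → ν) (x : String) :
    (pvKeyed P F).contains x = true ↔ x ∈ P := by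
  rw [PySem.Dict.contains_iff_mem_keys]
  simp [pvKeyed, PySem.Dict.keys]

theorem pvKeyed_insert {ν : Type} (P : List String) (F : String → ν) (x : String) (v : ν) :
    (pvKeyed P F).insert x v = pvKeyed (PySem.Set.add P x) (fun a => if a = x then v else F a) := by
  by_cases hx : x ∈ P
  · have hc : (pvKeyed P F).contains x = true := (pvKeyed_contains P F x).mpr hx
    have hl : PySem.Set.contains P x = true := by
      simp [PySem.Set.contains, hx]
    rw [show (pvKeyed P F).insert x v
          = PySem.Dict.mk ((pvKeyed P F).items.map (fun p => if p.1 == x then (x, v) else p))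
        from by simp [PySem.Dict.insert, hc],
        show PySem.Set.add P x = P from by simp [PySem.Set.add, hx]]
    unfold pvKeyed
    congr 1
    rw [List.map_map]
    refine List.map_congr_left (fun a _ => ?_)
    by_cases hax : a = x <;> simp [hax]
  · have hc : (pvKeyed P F).contains x = false := by
      rw [Bool.eq_false_iff]; exact fun h => hx ((pvKeyed_contains P F x).mp h)
    have hl : PySem.Set.contains P x = false := by
      rw [Bool.eq_false_iff]
      simp only [PySem.Set.contains, ne_eq, List.contains_iff_mem]
      exact hx
    rw [show (pvKeyed P F).insert x v = PySem.Dict.mk ((pvKeyed P F).items ++ [(x, v)])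
        from by simp [PySem.Dict.insert, hc],
        show PySem.Set.add P x = P ++ [x] from by simp [PySem.Set.add, hx]]
    unfold pvKeyed
    refine congrArg PySem.Dict.mk ?_
    rw [List.map_append,
        show (PySem.Dict.mk (P.map fun a => (a, F a))).items = P.map (fun a => (a, F a)) from rfl]
    congr 1
    · refine List.map_congr_left (fun a ha => ?_)
      have : a ≠ x := fun h => hx (h ▸ ha)
      simp [this]
    · simp

theorem pvKeyed_getD {ν : Type} (P : List String) (F : String → ν) (x : String) (d0 : ν) :
    (pvKeyed P F).getD x d0 = if x ∈ P then F x else d0 := by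
  induction P with
  | nil => simp [pvKeyed, PySem.Dict.getD, PySem.Dict.get?]
  | cons h t ih =>
    by_cases hx : h = x
    · subst hx
      simp [pvKeyed, PySem.Dict.getD, PySem.Dict.get?]
    · have hbeq : (h == x) = false := by simp [hx]
      have hmem : (x ∈ h :: t) ↔ (x ∈ t) := by
        simp only [List.mem_cons]
        exact ⟨fun h' => h'.resolve_left (fun hh => hx hh.symm), Or.inr⟩
      simp only [pvKeyed, PySem.Dict.getD, PySem.Dict.get?, List.map_cons, List.find?, hbeq] at ih ⊢
      rw [ih]
      by_cases hxt : x ∈ t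
      · rw [if_pos hxt, if_pos (hmem.mpr hxt)]
      · rw [if_neg hxt, if_neg (fun h' => hxt (hmem.mp h'))]

-- the inner row-building fold: insert each key with a value depending only on the key
theorem pvRowFold (M : List String) (g : String → Int) :
    ∀ (P : List String),
      M.foldl (fun dd ec => dd.insert ec (g ec)) (pvKeyed P g)
        = pvKeyed (M.foldl PySem.Set.add P) g := by
  induction M with
  | nil => intro P; simp
  | cons ec M ih =>
    intro P
    simp only [List.foldl_cons]
    rw [pvKeyed_insert P g ec (g ec),
        pvKeyed_congr _ _ g (fun a _ => by by_cases h : a = ec <;> simp [h]), ih]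

-- Python's d[el][ec] = … loop: modify the row at el, leave every other row alone
theorem pvModifyFold (M : List String) (el : String) (g : String → Int) :
    ∀ (F : String → PySem.Dict String Int) (P : List String), el ∈ P →
      M.foldl (fun d ec => d.modify el PySem.Dict.empty (fun inner => inner.insert ec (g ec))) (pvKeyed P F)
        = pvKeyed P (fun a => if a = el then M.foldl (fun dd ec => dd.insert ec (g ec)) (F el) else F a) := by
  induction M with
  | nil =>
    intro F P _
    exact pvKeyed_congr _ _ _ (fun a _ => by by_cases h : a = el <;> simp [h])
  | cons ec M ih =>
    intro F P hel
    rw [List.foldl_cons, List.foldl_cons]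
    have hadd : PySem.Set.add P el = P := by
      have : PySem.Set.contains P el = true := by
        simp [PySem.Set.contains, hel]
      simp [PySem.Set.add, hel]
    have hinit : (pvKeyed P F).modify el PySem.Dict.empty (fun inner => inner.insert ec (g ec))
        = pvKeyed P (fun a => if a = el then (F el).insert ec (g ec) else F a) := by
      rw [PySem.Dict.modify, pvKeyed_getD, if_pos hel, pvKeyed_insert, hadd]
    rw [hinit, ih _ P hel]
    refine pvKeyed_congr _ _ _ (fun a _ => ?_)
    by_cases h : a = el <;> simp [h]

-- the whole nested loop of A, for an arbitrary entry function g
theorem pvMatrixFold (g : String → String → Int) (M : List String) :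
    ∀ (L P : List String) (F : String → PySem.Dict String Int),
      L.foldl (fun d el =>
          M.foldl (fun d ec => d.modify el PySem.Dict.empty (fun inner => inner.insert ec (g el ec)))
            (d.insert el PySem.Dict.empty))
        (pvKeyed P F)
        = pvKeyed (L.foldl PySem.Set.add P)
            (fun a => if a ∈ L then pvKeyed (M.foldl PySem.Set.add []) (g a) else F a) := by
  intro L
  induction L with
  | nil =>
    intro P F
    simp only [List.foldl_nil]
    exact pvKeyed_congr _ _ _ (fun a _ => by simp)
  | cons el L ih =>
    intro P F
    simp only [List.foldl_cons]
    have hempty : (PySem.Dict.empty : PySem.Dict String (PySem.Dict String Int)) = pvKeyed [] F := rfl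
    rw [pvKeyed_insert P F el PySem.Dict.empty,
        pvModifyFold M el (g el) _ _ ((PySem.Set.mem_add P el el).mpr (Or.inr rfl)), ih]
    refine pvKeyed_congr _ _ _ (fun a _ => ?_)
    by_cases haL : a ∈ L
    · simp [haL]
    · by_cases hael : a = el
      · subst hael
        have : (PySem.Dict.empty : PySem.Dict String Int) = pvKeyed [] (g a) := rfl
        simp [haL, this, pvRowFold M (g a) []]
      · simp [haL, hael]

-- the Brier sum for the identity matrix, in closed form
theorem pvBrierSum (L : List String) (a b : String) :
    L.foldl (fun u j => u + ((if a == j then (1 : Int) else 0) - (if b == j then 1 else 0)) ^ 2) 0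
      = if a == b then (0 : Int) else ((L.count a : Int) + (L.count b : Int)) := by
  rw [PySem.List.foldl_add L
        (fun j => ((if a == j then (1 : Int) else 0) - (if b == j then 1 else 0)) ^ 2) 0, zero_add]
  by_cases hab : a = b
  · subst hab
    rw [if_pos (by simp)]
    apply List.sum_eq_zero
    intro x hx
    simp only [List.mem_map] at hx
    obtain ⟨j, -, rfl⟩ := hx
    by_cases h : a = j <;> simp [h]
  · rw [if_neg (by simpa using hab)]
    induction L with
    | nil => simp
    | cons j t ih =>
      simp only [List.map_cons, List.sum_cons, List.count_cons, beq_iff_eq] at ih ⊢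
      rw [ih]
      have hba : ¬ b = a := fun h => hab h.symm
      by_cases hja : j = a <;> by_cases hjb : j = b
      · exact absurd (hja.symm.trans hjb) hab
      · simp only [hja, if_neg hba, if_neg hab]
        push_cast
        ring
      · simp only [hjb, if_neg hba, if_neg hab]
        push_cast
        ring
      · have haj : ¬ a = j := fun h => hja h.symm
        have hbj : ¬ b = j := fun h => hjb h.symm
        simp only [if_neg haj, if_neg hbj, if_neg hja, if_neg hjb]
        push_cast
        ring

-- ===== VERDICT (by name: the statement is the Claim_ definition above) =====
theorem predictorIdentity_spec : Claim_equal_predictorIdentity := by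
  intro L _
  unfold Spec_predictorIdentity predictorIdentity predictorIdentity_alt unitBrier
  rw [PySem.Dict.foldl_insert_getD_add_one_eq_counter L]
  simp only [PySem.Dict.keys_counter, PySem.Dict.getD_counter]
  set S : List String := PySem.Set.ofList L with hS
  have hSofList : PySem.Set.ofList L = L.foldl PySem.Set.add [] := rfl
  have hemp : (PySem.Dict.empty : PySem.Dict String (PySem.Dict String Int))
      = pvKeyed [] (fun _ => PySem.Dict.empty) := rfl
  -- phase 1: the identity cond-probability matrix
  have hcond := pvMatrixFold (fun a b => if a == b then (1 : Int) else 0) L L []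
      (fun _ => PySem.Dict.empty)
  rw [hemp, hcond, ← hSofList, ← hS]
  set condD := pvKeyed S
      (fun a => if a ∈ L then pvKeyed S (fun b => if a == b then (1 : Int) else 0)
                else PySem.Dict.empty) with hcondD
  -- phase 2: the Brier matrix
  have hbrier := pvMatrixFold
      (fun aa_1 aa_2 => L.foldl (fun u j =>
        u + ((condD.getD aa_1 PySem.Dict.empty).getD j 0 - (if aa_2 == j then 1 else 0)) ^ 2) 0)
      L L [] (fun _ => PySem.Dict.empty)
  rw [hbrier, ← hSofList, ← hS]
  simp only [Prod.mk.injEq]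
  refine ⟨trivial, ?_, ?_⟩
  · -- cond matrix items
    simp only [hcondD, pvKeyed]
    rw [List.map_map]
    refine List.map_congr_left (fun a haS => ?_)
    have haL : a ∈ L := (PySem.Set.mem_ofList L a).mp haS
    simp [haL]
  · -- Brier matrix items
    simp only [pvKeyed]
    rw [List.map_map]
    refine List.map_congr_left (fun a haS => ?_)
    have haL : a ∈ L := (PySem.Set.mem_ofList L a).mp haS
    simp only [Function.comp, haL, if_pos]
    refine congrArg (Prod.mk a) (List.map_congr_left (fun b hbS => ?_))
    refine congrArg (Prod.mk b) ?_
    -- the per-cell sum, reduced to the closed form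
    have hrow : condD.getD a PySem.Dict.empty
        = pvKeyed S (fun c => if a == c then (1 : Int) else 0) := by
      rw [hcondD, pvKeyed_getD, if_pos haS, if_pos haL]
    have hcell : ∀ (u : Int), ∀ j ∈ L,
        u + ((condD.getD a PySem.Dict.empty).getD j 0 - (if b == j then (1 : Int) else 0)) ^ 2
          = u + ((if a == j then (1 : Int) else 0) - (if b == j then 1 else 0)) ^ 2 := by
      intro u j hjL
      rw [hrow, pvKeyed_getD, if_pos ((PySem.Set.mem_ofList L j).mpr hjL)]
    rw [PySem.List.foldl_congr_mem L _ _ 0 hcell, pvBrierSum]
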